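-- pv_equiv track=rewrite | github.com/willhutson/ongoing_agent_builder | src/services/prompt_assembler.py | _format_content_rules
-- ===== SOURCE A (Python) =====
-- def _format_content_rules(rules: dict) -> str:
--     """Format content rules as readable text."""
--     lines = []
--
--     if rules.get("always"):
--         lines.append("Always include:")
--         for item in rules["always"]:
--             lines.append(f"  - {item}")
--
--     if rules.get("never"):
--         lines.append("Never use:")
--         for item in rules["never"]:
--             lines.append(f"  - {item}")
--
--     if rules.get("prefer"):
--         lines.append("Prefer:")
--         for item in rules["prefer"]:
--             lines.append(f"  - {item}")
--
--     if rules.get("avoid"):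
--         lines.append("Try to avoid:")
--         for item in rules["avoid"]:
--             lines.append(f"  - {item}")
--
--     return "\n".join(lines)
-- ===== SOURCE B (Python) =====
-- def _format_content_rules(rules: dict) -> str:
--     """Format content rules as readable text."""
--     table = (
--         ("always", "Always include:"),
--         ("never", "Never use:"),
--         ("prefer", "Prefer:"),
--         ("avoid", "Try to avoid:"),
--     )
--
--     def go(i: int) -> str:
--         if i == len(table):
--             return ""
--         rest = go(i + 1)
--         key, header = table[i]
--         items = rules.get(key)
--         if not items:
--             return rest
--         block = header
--         for item in items:
--             block += f"\n  - {item}"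
--         return block if not rest else f"{block}\n{rest}"
--
--     return go(0)
-- ===== Notes on version B (the rewrite author's own statement) =====
-- stated objective: alternative
-- what changed: Replaces A's flat line-list accumulation plus one final '\n'.join with a back-to-front recursion over a section table that builds the result string directly, concatenating each section's block onto the already-formatted rest (no intermediate line list, no global join).
import Mathlib
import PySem

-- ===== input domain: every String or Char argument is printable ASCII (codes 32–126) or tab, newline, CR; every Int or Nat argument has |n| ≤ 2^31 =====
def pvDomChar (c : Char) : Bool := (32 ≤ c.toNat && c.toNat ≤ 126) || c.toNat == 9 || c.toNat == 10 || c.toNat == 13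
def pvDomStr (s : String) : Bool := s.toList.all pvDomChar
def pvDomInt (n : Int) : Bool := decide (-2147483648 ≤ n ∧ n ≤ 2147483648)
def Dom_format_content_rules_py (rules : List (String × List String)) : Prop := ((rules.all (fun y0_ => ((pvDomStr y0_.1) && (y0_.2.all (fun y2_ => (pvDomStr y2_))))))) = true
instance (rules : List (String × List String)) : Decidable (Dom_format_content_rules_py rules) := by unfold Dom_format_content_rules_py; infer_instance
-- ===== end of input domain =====

-- B builds the result string directly by a back-to-front recursion over a section table,
-- instead of A's flat line-list accumulation followed by one global '\n'.join (objective: alternative).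

-- ===== PORT A =====
-- four explicit blocks, exactly as A writes them; 'if rules.get(k):' = lookup yields a nonempty list
def format_content_rules_py (rules : List (String × List String)) : String :=
  let d := PySem.Dict.ofList rules
  let lines : List String := []
  let lines := match d.get? "always" with
    | some (x :: xs) => (x :: xs).foldl (fun ls it => ls ++ ["  - " ++ it]) (lines ++ ["Always include:"])
    | _ => lines
  let lines := match d.get? "never" with
    | some (x :: xs) => (x :: xs).foldl (fun ls it => ls ++ ["  - " ++ it]) (lines ++ ["Never use:"])
    | _ => lines
  let lines := match d.get? "prefer" with
    | some (x :: xs) => (x :: xs).foldl (fun ls it => ls ++ ["  - " ++ it]) (lines ++ ["Prefer:"])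
    | _ => lines
  let lines := match d.get? "avoid" with
    | some (x :: xs) => (x :: xs).foldl (fun ls it => ls ++ ["  - " ++ it]) (lines ++ ["Try to avoid:"])
    | _ => lines
  PySem.Str.join "\n" lines

-- ===== PORT B =====
-- recursion over the remaining table entries, as Source B's go(i) recurses on the index;
-- 'block += f"\n  - {item}"' is the string foldl; 'not rest' on a str is 'rest = ""'
def fcrGo (d : PySem.Dict String (List String)) : List (String × String) → String
  | [] => ""
  | kh :: tl =>
      let rest := fcrGo d tl
      let items := (d.get? kh.1).getD []
      if items.isEmpty then rest
      else
        let block := items.foldl (fun b it => b ++ "\n  - " ++ it) kh.2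
        if rest = "" then block else block ++ "\n" ++ rest

def format_content_rules_py_alt (rules : List (String × List String)) : String :=
  fcrGo (PySem.Dict.ofList rules)
    [("always", "Always include:"), ("never", "Never use:"),
     ("prefer", "Prefer:"), ("avoid", "Try to avoid:")]

-- ===== PRECONDITION & SPEC =====
def Spec_format_content_rules_py (rules : List (String × List String)) (out : String) : Prop := out = format_content_rules_py_alt rules
instance (rules : List (String × List String)) (out : String) : Decidable (Spec_format_content_rules_py rules out) := by unfold Spec_format_content_rules_py; infer_instance

-- ===== CLAIM (what is proved, stated in full; the proofs are below) =====
def Claim_equal_format_content_rules_py : Prop := ∀ (rules : List (String × List String)), Dom_format_content_rules_py rules → Spec_format_content_rules_py rules (format_content_rules_py rules)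

-- ===== LEMMAS AND PROOFS =====

-- the lines one section contributes (header + indented items when the lookup is a nonempty list)
def secLines (d : PySem.Dict String (List String)) (kh : String × String) : List String :=
  match d.get? kh.1 with
  | some (x :: xs) => kh.2 :: (x :: xs).map (fun it => "  - " ++ it)
  | _ => []

theorem foldl_append_map (items ls : List String) :
    items.foldl (fun a it => a ++ ["  - " ++ it]) ls = ls ++ items.map (fun it => "  - " ++ it) := by
  induction items generalizing ls with
  | nil => simp
  | cons x xs ih => simp [List.foldl, ih]

theorem join_nil_str : PySem.Str.join "\n" ([] : List String) = "" := by decide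

theorem join_cons_cons_str (p q : String) (rest : List String) :
    PySem.Str.join "\n" (p :: q :: rest) = p ++ "\n" ++ PySem.Str.join "\n" (q :: rest) := by
  apply String.toList_injective
  simp [PySem.Str.toList_join, PySem.Chars.join_cons_cons, String.toList_append]

theorem join_singleton_str (p : String) : PySem.Str.join "\n" [p] = p := by
  apply String.toList_injective
  simp [PySem.Str.toList_join, PySem.Chars.join_singleton]

theorem join_ne_empty (l : String) (L : List String) (hl : l.toList ≠ []) :
    PySem.Str.join "\n" (l :: L) ≠ "" := by
  intro h
  cases L with
  | nil =>
      rw [join_singleton_str] at h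
      exact hl (by rw [h]; rfl)
  | cons q r =>
      rw [join_cons_cons_str] at h
      have := congrArg String.toList h
      simp [String.toList_append] at this

theorem join_append_str (L1 L2 : List String) (h1 : L1 ≠ []) (h2 : L2 ≠ []) :
    PySem.Str.join "\n" (L1 ++ L2) = PySem.Str.join "\n" L1 ++ "\n" ++ PySem.Str.join "\n" L2 := by
  induction L1 with
  | nil => exact absurd rfl h1
  | cons a t ih =>
      cases t with
      | nil =>
          cases L2 with
          | nil => exact absurd rfl h2
          | cons q r =>
              rw [List.singleton_append, join_cons_cons_str, join_singleton_str]
      | cons b t' =>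
          have := ih (by simp) 
          calc PySem.Str.join "\n" (a :: (b :: t') ++ L2)
              = a ++ "\n" ++ PySem.Str.join "\n" ((b :: t') ++ L2) := by
                cases t' <;> simp [join_cons_cons_str]
            _ = a ++ "\n" ++ (PySem.Str.join "\n" (b :: t') ++ "\n" ++ PySem.Str.join "\n" L2) := by rw [this]
            _ = PySem.Str.join "\n" (a :: b :: t') ++ "\n" ++ PySem.Str.join "\n" L2 := by
                rw [join_cons_cons_str a b t']
                simp [String.append_assoc]

theorem join_head_split (a w : String) (M : List String) :
    PySem.Str.join "\n" ((a ++ "\n" ++ w) :: M) = a ++ "\n" ++ PySem.Str.join "\n" (w :: M) := by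
  cases M with
  | nil => rw [join_singleton_str, join_singleton_str]
  | cons m ms =>
      rw [join_cons_cons_str, join_cons_cons_str]
      simp [String.append_assoc]

-- Source B's in-place 'block += "\n  - " + item' loop, characterised as a join
theorem fold_block (items : List String) (a : String) :
    items.foldl (fun b it => b ++ "\n  - " ++ it) a
      = PySem.Str.join "\n" (a :: items.map (fun it => "  - " ++ it)) := by
  induction items generalizing a with
  | nil => simp [join_singleton_str]
  | cons x xs ih =>
      simp only [List.foldl, List.map]
      rw [ih]
      have hsplit : a ++ "\n  - " ++ x = a ++ "\n" ++ ("  - " ++ x) := by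
        apply String.toList_injective
        simp [String.toList_append]
      rw [hsplit, join_head_split, join_cons_cons_str]

theorem secLines_elem_ne_nil (d : PySem.Dict String (List String)) (kh : String × String)
    (hh : kh.2.toList ≠ []) : ∀ s ∈ secLines d kh, s.toList ≠ [] := by
  intro s hs
  unfold secLines at hs
  rcases h : d.get? kh.1 with _ | (_ | ⟨x, xs⟩) <;> simp [h] at hs
  rcases hs with h' | h'
  · exact h' ▸ hh
  · rcases h' with h' | ⟨it, _, h'⟩ <;> subst h' <;> simp [String.toList_append]

theorem fcrGo_eq_join (d : PySem.Dict String (List String)) (tbl : List (String × String))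
    (hh : ∀ kh ∈ tbl, kh.2.toList ≠ []) :
    fcrGo d tbl = PySem.Str.join "\n" ((tbl.map (secLines d)).flatten) := by
  induction tbl with
  | nil => simp [fcrGo, join_nil_str]
  | cons kh tl ih =>
      have hrest := ih (fun x hx => hh x (List.mem_cons_of_mem _ hx))
      have hne : ∀ s ∈ ((tl.map (secLines d)).flatten), s.toList ≠ [] := by
        intro s hs
        simp only [List.mem_flatten, List.mem_map] at hs
        obtain ⟨L, ⟨kh', hkh', rfl⟩, hsL⟩ := hs
        exact secLines_elem_ne_nil d kh' (hh kh' (List.mem_cons_of_mem _ hkh')) s hsL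
      unfold fcrGo
      rcases hget : d.get? kh.1 with _ | (_ | ⟨x, xs⟩) <;>
        simp only [List.map, List.flatten, secLines, hget, Option.getD_some, Option.getD_none,
          List.isEmpty_nil, List.isEmpty_cons, if_true, if_false, Bool.false_eq_true]
      · exact hrest
      · exact hrest
      · rw [fold_block, hrest]
        rcases hflat : (tl.map (secLines d)).flatten with _ | ⟨q, r⟩
        · simp [join_nil_str]
        · have hq : q.toList ≠ [] := hne q (by rw [hflat]; simp)
          rw [if_neg (join_ne_empty q r hq)]
          have := join_append_str (kh.2 :: (x :: xs).map (fun it => "  - " ++ it)) (q :: r)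
            (by simp) (by simp)
          simp only [List.map, List.cons_append, List.append_eq] at this ⊢
          exact this.symm
  
theorem format_content_rules_py_eq_join (rules : List (String × List String)) :
    format_content_rules_py rules
      = PySem.Str.join "\n"
          (([("always", "Always include:"), ("never", "Never use:"),
             ("prefer", "Prefer:"), ("avoid", "Try to avoid:")].map
              (secLines (PySem.Dict.ofList rules))).flatten) := by
  unfold format_content_rules_py
  simp only [foldl_append_map]
  rcases h1 : (PySem.Dict.ofList rules).get? "always" with _ | (_ | ⟨a, as⟩) <;>
  rcases h2 : (PySem.Dict.ofList rules).get? "never" with _ | (_ | ⟨b, bs⟩) <;>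
  rcases h3 : (PySem.Dict.ofList rules).get? "prefer" with _ | (_ | ⟨c, cs⟩) <;>
  rcases h4 : (PySem.Dict.ofList rules).get? "avoid" with _ | (_ | ⟨d, ds⟩) <;>
  simp [secLines, h1, h2, h3, h4]

-- ===== VERDICT (by name: the statement is the Claim_ definition above) =====
theorem format_content_rules_py_spec : Claim_equal_format_content_rules_py := by
  intro rules _
  unfold Spec_format_content_rules_py format_content_rules_py_alt
  rw [format_content_rules_py_eq_join,
      fcrGo_eq_join _ _ (by intro kh hkh; fin_cases hkh <;> decide)]
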